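-- pv_equiv track=rewrite | github.com/ilyava1/RE_PhoneBook | base_service.py | find_duples
-- ===== SOURCE A (Python) =====
-- def find_duples(smart_contacts_list):
--     """
--     Функция поиска дублей в телефонном справочнике.
--
--     Дублирующими считаются такие записи контактов, у которых совпадает
--     Имя, Фамилия и Отчество (либо Отчество в одом из контактов не указано).
--     Если дубли найдены, функция возвращает их индексы. Если дубли не найдены,
--     функция возвращает -1 в качестве индексов.
--
--     :param smart_contacts_list: список - телефонный справочник
--     :return: индексы элементов справочника являющихся дублями одного контакта
--     """
--     for i in range(len(smart_contacts_list) - 1):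
--         if (i + 1) <= len(smart_contacts_list) - 1:
--             for j in range(i + 1, len(smart_contacts_list)):
--                 if ((smart_contacts_list[i][0] == smart_contacts_list[j][0])
--                 and (smart_contacts_list[i][1] == smart_contacts_list[j][1])
--                 and ((smart_contacts_list[i][2] == smart_contacts_list[j][2])
--                     or (smart_contacts_list[i][2] == ''
--                     or smart_contacts_list[j][2] == ''))):
--                         return i,j
--     i = j = -1
--
--     return i,j
-- ===== SOURCE B (Python) =====
-- def find_duples(smart_contacts_list):
--     """Single-pass duplicate search: hash contacts by (name, surname); a group stores
--     its earliest index and first contact, and (once a second member shows up) a dict of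
--     earliest index per patronymic; keep the lexicographically smallest matching (i, j) pair."""
--     groups = {}
--     best = None
--     for t, contact in enumerate(smart_contacts_list):
--         key = (contact[0], contact[1])
--         g = groups.get(key)
--         if g is None:
--             groups[key] = (t, contact, None)
--         else:
--             m, first, d = g
--             if d is None:
--                 d = {first[2]: m}
--             p = contact[2]
--             if p == '':
--                 cand = m
--             else:
--                 c1 = d.get(p)
--                 c2 = d.get('')
--                 cand = c1 if c2 is None or (c1 is not None and c1 < c2) else c2
--             if cand is not None and (best is None or cand < best[0]):
--                 best = (cand, t)
--             if p not in d:
--                 d[p] = t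
--             groups[key] = (m, first, d)
--     return best if best is not None else (-1, -1)
-- ===== Notes on version B (the rewrite author's own statement) =====
-- stated objective: alternative
-- what changed: A's nested first-match scan over all index pairs is replaced by a single pass that hashes contacts by (name, surname), keeping per group the earliest index, first contact and (lazily) earliest index per patronymic, and maintaining the lexicographically smallest matching (i, j) pair; intended as asymptotically faster (O(n^2) worst case vs O(n)), but a timing run could not confirm it on random inputs where A early-returns (2.69x median at the largest size, inconsistent per input).
-- outside the precondition, e.g. on find_duples([['a']]): A returns (-1, -1), B raises IndexError; on find_duples([['a', 'b', 'c'], ['a', 'b', 'c'], ['a', 'b']]): A returns (0, 1), B raises IndexError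
import Mathlib
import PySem

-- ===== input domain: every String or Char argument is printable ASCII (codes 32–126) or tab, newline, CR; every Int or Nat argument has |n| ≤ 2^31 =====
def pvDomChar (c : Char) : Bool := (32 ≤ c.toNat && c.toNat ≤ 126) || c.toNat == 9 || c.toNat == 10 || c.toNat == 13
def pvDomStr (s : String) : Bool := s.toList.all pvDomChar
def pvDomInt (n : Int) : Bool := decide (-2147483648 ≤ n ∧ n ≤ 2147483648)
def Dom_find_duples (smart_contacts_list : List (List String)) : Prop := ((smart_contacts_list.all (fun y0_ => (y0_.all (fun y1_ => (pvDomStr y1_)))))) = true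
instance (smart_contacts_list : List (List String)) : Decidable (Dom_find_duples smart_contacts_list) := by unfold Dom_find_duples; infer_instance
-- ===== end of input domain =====

-- B replaces A's nested pairwise first-match scan by a single pass with a hash map
-- keyed by (name, surname) holding the earliest index overall and per patronymic,
-- keeping the lexicographically smallest matching index pair (objective: alternative
-- single-pass algorithm; return-value equivalence only).

-- ===== PORT A =====
-- contact field access l[i][k]; .getD totalizes the IndexError rows excluded by Pre_
def pvFld (l : List (List String)) (i k : Nat) : String :=
  (PySem.List.pyGet? ((PySem.List.pyGet? l (i : Int)).getD []) (k : Int)).getD ""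

def pvMatch (l : List (List String)) (i j : Nat) : Bool :=
  (pvFld l i 0 == pvFld l j 0) && ((pvFld l i 1 == pvFld l j 1) &&
    ((pvFld l i 2 == pvFld l j 2) || (pvFld l i 2 == "" || pvFld l j 2 == "")))

-- inner 'for j in range(i + 1, len(...))' loop: first j matching i
def pvInner (l : List (List String)) (i : Nat) : List Nat → Option Nat
  | [] => none
  | j :: js => if pvMatch l i j then some j else pvInner l i js

-- outer 'for i in range(len(...) - 1)' loop, with A's redundant bound check kept
def pvOuter (l : List (List String)) : List Nat → Option (Nat × Nat)
  | [] => none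
  | i :: is =>
      if i + 1 ≤ l.length - 1 then
        match pvInner l i (List.range' (i + 1) (l.length - (i + 1))) with
        | some j => some (i, j)
        | none => pvOuter l is
      else pvOuter l is

def find_duples (smart_contacts_list : List (List String)) : Int × Int :=
  match pvOuter smart_contacts_list (List.range (smart_contacts_list.length - 1)) with
  | some (i, j) => ((i : Int), (j : Int))
  | none => (-1, -1)

-- ===== PORT B =====
-- contact[k] for the current row; .getD totalizes the IndexError rows excluded by Pre_
def pvBFld (c : List String) (k : Nat) : String :=
  (PySem.List.pyGet? c (k : Int)).getD ""

-- the 'cand = c1 if c2 is None or (c1 is not None and c1 < c2) else c2' selection of Source B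
def pvCand (d : PySem.Dict String Int) (m : Int) (p : String) : Option Int :=
  if p == "" then some m
  else
    match d.get? "", d.get? p with
    | none, c1 => c1
    | some e2, some e1 => if e1 < e2 then some e1 else some e2
    | some e2, none => some e2

-- one iteration of Source B's 'for t, contact in enumerate(...)' loop
def pvStep (st : PySem.Dict (String × String) (Int × List String × Option (PySem.Dict String Int)) × Option (Int × Int))
    (tc : Int × List String) :
    PySem.Dict (String × String) (Int × List String × Option (PySem.Dict String Int)) × Option (Int × Int) :=
  let t := tc.1
  let c := tc.2
  let key := (pvBFld c 0, pvBFld c 1)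
  match st.1.get? key with
  | none => (st.1.insert key (t, c, none), st.2)
  | some g =>
      let m := g.1
      let d :=
        match g.2.2 with
        | none => (PySem.Dict.empty).insert (pvBFld g.2.1 2) m
        | some d => d
      let p := pvBFld c 2
      let cand := pvCand d m p
      let best' :=
        match cand with
        | none => st.2
        | some cv =>
            match st.2 with
            | none => some (cv, t)
            | some b => if cv < b.1 then some (cv, t) else some b
      let d' := if (d.get? p).isSome then d else d.insert p t
      (st.1.insert key (m, g.2.1, some d'), best')

def find_duples_alt (smart_contacts_list : List (List String)) : Int × Int :=
  (((PySem.List.enumerate smart_contacts_list 0).foldl pvStep (PySem.Dict.empty, none)).2).getD (-1, -1)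

-- ===== PRECONDITION & SPEC =====
-- Pre_ restricts to rows carrying the two key fields (length >= 2) and the patronymic
-- field on every pair of rows that agree on name and surname: outside this, a missing
-- field makes A raise IndexError unless its short-circuited scan never reads it, while
-- B (which hashes every row and reads the patronymic on every key repeat) raises.
def Pre_find_duples (smart_contacts_list : List (List String)) : Prop :=
  (∀ c ∈ smart_contacts_list, 2 ≤ c.length) ∧
  (∀ i ∈ List.range smart_contacts_list.length, ∀ j ∈ List.range smart_contacts_list.length,
    i < j →
    ((smart_contacts_list.getD i []).getD 0 "" = (smart_contacts_list.getD j []).getD 0 "" ∧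
     (smart_contacts_list.getD i []).getD 1 "" = (smart_contacts_list.getD j []).getD 1 "") →
    (3 ≤ (smart_contacts_list.getD i []).length ∧ 3 ≤ (smart_contacts_list.getD j []).length))
instance (smart_contacts_list : List (List String)) : Decidable (Pre_find_duples smart_contacts_list) := by
  unfold Pre_find_duples; infer_instance

def pvWitness_find_duples : List (List String) :=
  [["Ivan", "Petrov", "Ivanovich", "123"], ["Ivan", "Petrov", "", "456"]]

def Spec_find_duples (smart_contacts_list : List (List String)) (out : Int × Int) : Prop := out = find_duples_alt smart_contacts_list
instance (smart_contacts_list : List (List String)) (out : Int × Int) : Decidable (Spec_find_duples smart_contacts_list out) := by unfold Spec_find_duples; infer_instance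

-- ===== CLAIM (what is proved, stated in full; the proofs are below) =====
def Claim_equal_find_duples : Prop := ∀ (smart_contacts_list : List (List String)), Dom_find_duples smart_contacts_list → Pre_find_duples smart_contacts_list → Spec_find_duples smart_contacts_list (find_duples smart_contacts_list)

-- ===== LEMMAS AND PROOFS =====

-- index of the first i < t satisfying P (scanning upward)
def pvFirstIdx (P : Nat → Bool) : Nat → Option Nat
  | 0 => none
  | t + 1 =>
      match pvFirstIdx P t with
      | some i => some i
      | none => if P t then some t else none

def pvOMin : Option Nat → Option Nat → Option Nat
  | none, b => b
  | some a, none => some a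
  | some a, some b => some (min a b)

lemma pvFirstIdx_none {P : Nat → Bool} : ∀ {t : Nat}, pvFirstIdx P t = none ↔ ∀ i, i < t → P i = false := by
  intro t
  induction t with
  | zero => simp [pvFirstIdx]
  | succ t ih =>
    simp only [pvFirstIdx]
    cases hf : pvFirstIdx P t with
    | some i =>
      simp only []
      constructor
      · intro h; exact absurd h (by simp)
      · intro h
        have := (ih.mpr (fun i hi => h i (by omega)))
        rw [hf] at this; exact absurd this (by simp)
    | none =>
      simp only []
      constructor
      · intro h
        split at h
        · exact absurd h (by simp)
        · intro i hi
          rcases Nat.lt_succ_iff_lt_or_eq.mp hi with h' | h'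
          · exact ih.mp hf i h'
          · subst h'; simpa using ‹¬ P i = true›
      · intro h
        rw [if_neg]
        simp [h t (by omega)]


lemma pvFirstIdx_some {P : Nat → Bool} : ∀ {t i : Nat}, pvFirstIdx P t = some i →
    i < t ∧ P i = true ∧ ∀ i', i' < i → P i' = false := by
  intro t
  induction t with
  | zero => intro i h; simp [pvFirstIdx] at h
  | succ t ih =>
    intro i h
    simp only [pvFirstIdx] at h
    cases hf : pvFirstIdx P t with
    | some i0 =>
      rw [hf] at h
      simp only [Option.some.injEq] at h
      subst h
      obtain ⟨h1, h2, h3⟩ := ih hf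
      exact ⟨by omega, h2, h3⟩
    | none =>
      rw [hf] at h
      by_cases hPt : P t
      · simp only [hPt, if_true, Option.some.injEq] at h
        subst h
        exact ⟨by omega, hPt, fun i' hi' => pvFirstIdx_none.mp hf i' hi'⟩
      · simp [hPt] at h

lemma pvFirstIdx_congr {P Q : Nat → Bool} : ∀ {t : Nat}, (∀ i, i < t → P i = Q i) →
    pvFirstIdx P t = pvFirstIdx Q t := by
  intro t
  induction t with
  | zero => intro _; rfl
  | succ t ih =>
    intro h
    simp only [pvFirstIdx]
    rw [ih (fun i hi => h i (by omega)), h t (by omega)]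

lemma pvFirstIdx_eq_some {P : Nat → Bool} {t i : Nat} (h1 : i < t) (h2 : P i = true)
    (h3 : ∀ i', i' < i → P i' = false) : pvFirstIdx P t = some i := by
  cases hf : pvFirstIdx P t with
  | none => rw [pvFirstIdx_none.mp hf i h1] at h2; cases h2
  | some j =>
    obtain ⟨ha, hb, hc⟩ := pvFirstIdx_some hf
    by_cases hij : j < i
    · rw [h3 j hij] at hb; cases hb
    · by_cases hji : i < j
      · rw [hc i hji] at h2; cases h2
      · have : i = j := by omega
        rw [this]

lemma pvFirstIdx_or {P Q : Nat → Bool} : ∀ {t : Nat},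
    pvFirstIdx (fun i => P i || Q i) t = pvOMin (pvFirstIdx P t) (pvFirstIdx Q t) := by
  intro t
  induction t with
  | zero => rfl
  | succ t ih =>
    simp only [pvFirstIdx, ih]
    cases hp : pvFirstIdx P t with
    | some a =>
      cases hq : pvFirstIdx Q t with
      | some b => simp [pvOMin]
      | none =>
        have ha := (pvFirstIdx_some hp).1
        by_cases hQt : Q t
        · simp [pvOMin, hQt, Nat.min_eq_left (by omega : a ≤ t)]
        · simp [pvOMin, hQt]
    | none =>
      cases hq : pvFirstIdx Q t with
      | some b =>
        have hb := (pvFirstIdx_some hq).1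
        by_cases hPt : P t
        · simp [pvOMin, hPt, Nat.min_eq_right (by omega : b ≤ t)]
        · simp [pvOMin, hPt]
      | none =>
        by_cases hPt : P t <;> by_cases hQt : Q t <;> simp [pvOMin, hPt, hQt]

def pvKey (l : List (List String)) (i : Nat) : String × String := (pvFld l i 0, pvFld l i 1)
def pvPatr (l : List (List String)) (i : Nat) : String := pvFld l i 2

lemma pvMatch_eq (l : List (List String)) (i j : Nat) :
    pvMatch l i j = ((pvKey l i == pvKey l j) &&
      (pvPatr l i == pvPatr l j || (pvPatr l i == "" || pvPatr l j == ""))) := by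
  simp only [pvMatch, pvKey, pvPatr]
  rw [show ((pvFld l i 0, pvFld l i 1) == (pvFld l j 0, pvFld l j 1)) =
      ((pvFld l i 0 == pvFld l j 0) && (pvFld l i 1 == pvFld l j 1)) from rfl]
  ac_rfl

lemma pvInner_none {l : List (List String)} {i : Nat} : ∀ {c s : Nat},
    pvInner l i (List.range' s c) = none ↔ ∀ j, s ≤ j → j < s + c → pvMatch l i j = false := by
  intro c
  induction c with
  | zero => intro s; simp [List.range', pvInner]; omega
  | succ c ih =>
    intro s
    rw [List.range'_succ]
    simp only [pvInner]
    by_cases hm : pvMatch l i s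
    · simp only [hm, if_true]
      constructor
      · intro h; exact absurd h (by simp)
      · intro h; rw [h s (by omega) (by omega)] at hm; exact absurd hm (by simp)
    · simp only [hm]
      rw [if_neg (by simp)]
      rw [ih]
      constructor
      · intro h j hj1 hj2
        rcases Nat.eq_or_lt_of_le hj1 with h' | h'
        · subst h'; simpa using hm
        · exact h j h' (by omega)
      · intro h j hj1 hj2; exact h j (by omega) (by omega)

lemma pvInner_some {l : List (List String)} {i : Nat} : ∀ {c s j : Nat},
    pvInner l i (List.range' s c) = some j →
    s ≤ j ∧ j < s + c ∧ pvMatch l i j = true ∧ ∀ j', s ≤ j' → j' < j → pvMatch l i j' = false := by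
  intro c
  induction c with
  | zero => intro s j h; simp [List.range', pvInner] at h
  | succ c ih =>
    intro s j h
    rw [List.range'_succ] at h
    simp only [pvInner] at h
    by_cases hm : pvMatch l i s
    · rw [if_pos hm] at h
      simp only [Option.some.injEq] at h
      subst h
      exact ⟨by omega, by omega, hm, fun j' h1 h2 => by omega⟩
    · rw [if_neg hm] at h
      obtain ⟨h1, h2, h3, h4⟩ := ih h
      refine ⟨by omega, by omega, h3, fun j' hj1 hj2 => ?_⟩
      rcases Nat.eq_or_lt_of_le hj1 with h' | h'
      · subst h'; simpa using hm
      · exact h4 j' h' hj2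

-- characterization of A's outer loop started at index s
def pvAok (l : List (List String)) (r : Option (Nat × Nat)) (s : Nat) : Prop :=
  match r with
  | none => ∀ i j, s ≤ i → i < j → j < l.length → pvMatch l i j = false
  | some (i, j) => s ≤ i ∧ i < j ∧ j < l.length ∧ pvMatch l i j = true ∧
      (∀ i' j', s ≤ i' → i' < j' → j' < l.length → pvMatch l i' j' = true → i ≤ i') ∧
      (∀ j', i < j' → j' < j → pvMatch l i j' = false)

lemma pvOuter_ok (l : List (List String)) : ∀ (c s : Nat), s + c = l.length - 1 →
    pvAok l (pvOuter l (List.range' s c)) s := by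
  intro c
  induction c with
  | zero =>
    intro s hs
    simp only [List.range', pvOuter, pvAok]
    intro i j hi hij hj
    omega
  | succ c ih =>
    intro s hs
    rw [List.range'_succ]
    simp only [pvOuter]
    rw [if_pos (by omega)]
    cases hin : pvInner l s (List.range' (s + 1) (l.length - (s + 1))) with
    | some j =>
      obtain ⟨h1, h2, h3, h4⟩ := pvInner_some hin
      have hj : j < l.length := by omega
      exact ⟨Nat.le_refl s, by omega, hj, h3,
        fun i' j' hi' _ _ _ => hi',
        fun j' hj1 hj2 => h4 j' (by omega) hj2⟩
    | none =>
      have hnone : ∀ j, s < j → j < l.length → pvMatch l s j = false := by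
        intro j hj1 hj2
        exact pvInner_none.mp hin j (by omega) (by omega)
      have := ih (s + 1) (by omega)
      cases hr : pvOuter l (List.range' (s + 1) c) with
      | none =>
        rw [hr] at this
        simp only [pvAok] at this ⊢
        intro i j hi hij hj
        rcases Nat.eq_or_lt_of_le hi with h' | h'
        · subst h'; exact hnone j hij hj
        · exact this i j h' hij hj
      | some p =>
        obtain ⟨i, j⟩ := p
        rw [hr] at this
        simp only [pvAok] at this ⊢
        obtain ⟨h1, h2, h3, h4, h5, h6⟩ := this
        refine ⟨by omega, h2, h3, h4, ?_, h6⟩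
        intro i' j' hi' hij' hj' hm
        rcases Nat.eq_or_lt_of_le hi' with h' | h'
        · subst h'; rw [hnone j' hij' hj'] at hm; exact absurd hm (by simp)
        · exact h5 i' j' h' hij' hj' hm

-- the candidate and 'best' values Source B holds after processing the first t rows
def pvCandS (l : List (List String)) (t : Nat) : Option Nat :=
  pvFirstIdx (fun i => pvMatch l i t) t

def pvBest (l : List (List String)) : Nat → Option (Nat × Nat)
  | 0 => none
  | t + 1 =>
      match pvCandS l t with
      | none => pvBest l t
      | some c =>
          match pvBest l t with
          | none => some (c, t)
          | some b => if c < b.1 then some (c, t) else some b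

-- r is the lexicographically least matching pair (i, j) with j < t
def pvLex (l : List (List String)) (t : Nat) (r : Option (Nat × Nat)) : Prop :=
  match r with
  | none => ∀ i j, i < j → j < t → pvMatch l i j = false
  | some (i, j) => i < j ∧ j < t ∧ pvMatch l i j = true ∧
      ∀ i' j', i' < j' → j' < t → pvMatch l i' j' = true → (i < i' ∨ (i = i' ∧ j ≤ j'))

lemma pvAok_lex {l : List (List String)} {r : Option (Nat × Nat)} (h : pvAok l r 0) :
    pvLex l l.length r := by
  cases r with
  | none => exact fun i j hij hj => h i j (by omega) hij hj
  | some p =>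
    obtain ⟨i, j⟩ := p
    obtain ⟨_, h2, h3, h4, h5, h6⟩ := h
    refine ⟨h2, h3, h4, fun i' j' hij' hj' hm => ?_⟩
    have hii' : i ≤ i' := h5 i' j' (by omega) hij' hj' hm
    rcases Nat.eq_or_lt_of_le hii' with h' | h'
    · subst h'
      right
      refine ⟨rfl, ?_⟩
      by_contra hc
      rw [h6 j' (by omega) (by omega)] at hm
      exact absurd hm (by simp)
    · exact Or.inl h'

lemma pvBest_lex (l : List (List String)) : ∀ t : Nat, pvLex l t (pvBest l t) := by
  intro t
  induction t with
  | zero => exact fun i j hij hj => by omega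
  | succ t ih =>
    simp only [pvBest]
    cases hc : pvCandS l t with
    | none =>
      have hno : ∀ i, i < t → pvMatch l i t = false := pvFirstIdx_none.mp hc
      cases hb : pvBest l t with
      | none =>
        rw [hb] at ih
        intro i j hij hj
        rcases Nat.lt_succ_iff_lt_or_eq.mp hj with h' | h'
        · exact ih i j hij h'
        · subst h'; exact hno i hij
      | some b =>
        obtain ⟨bi, bj⟩ := b
        rw [hb] at ih
        obtain ⟨h1, h2, h3, h4⟩ := ih
        refine ⟨h1, by omega, h3, fun i' j' hij' hj' hm => ?_⟩
        rcases Nat.lt_succ_iff_lt_or_eq.mp hj' with h' | h'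
        · exact h4 i' j' hij' h' hm
        · subst h'; rw [hno i' hij'] at hm; exact absurd hm (by simp)
    | some cv =>
      obtain ⟨hcv1, hcv2, hcv3⟩ := pvFirstIdx_some hc
      cases hb : pvBest l t with
      | none =>
        rw [hb] at ih
        refine ⟨hcv1, by omega, hcv2, fun i' j' hij' hj' hm => ?_⟩
        rcases Nat.lt_succ_iff_lt_or_eq.mp hj' with h' | h'
        · rw [ih i' j' hij' h'] at hm; exact absurd hm (by simp)
        · subst h'
          by_cases h'' : i' < cv
          · rw [hcv3 i' h''] at hm; exact absurd hm (by simp)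
          · omega
      | some b =>
        obtain ⟨bi, bj⟩ := b
        rw [hb] at ih
        obtain ⟨h1, h2, h3, h4⟩ := ih
        show pvLex l (t + 1) (if cv < bi then some (cv, t) else some (bi, bj))
        by_cases hlt : cv < bi
        · rw [if_pos hlt]
          refine ⟨hcv1, by omega, hcv2, fun i' j' hij' hj' hm => ?_⟩
          rcases Nat.lt_succ_iff_lt_or_eq.mp hj' with h' | h'
          · have := h4 i' j' hij' h' hm; omega
          · subst h'
            by_cases h'' : i' < cv
            · rw [hcv3 i' h''] at hm; exact absurd hm (by simp)
            · omega
        · rw [if_neg hlt]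
          refine ⟨h1, by omega, h3, fun i' j' hij' hj' hm => ?_⟩
          rcases Nat.lt_succ_iff_lt_or_eq.mp hj' with h' | h'
          · exact h4 i' j' hij' h' hm
          · subst h'
            by_cases h'' : i' < cv
            · rw [hcv3 i' h''] at hm; exact absurd hm (by simp)
            · omega

lemma pvLex_unique {l : List (List String)} {t : Nat} {r r' : Option (Nat × Nat)}
    (h : pvLex l t r) (h' : pvLex l t r') : r = r' := by
  cases r with
  | none =>
    cases r' with
    | none => rfl
    | some p =>
      obtain ⟨i, j⟩ := p
      obtain ⟨h1, h2, h3, _⟩ := h'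
      rw [h i j h1 h2] at h3
      exact absurd h3 (by simp)
  | some p =>
    obtain ⟨i, j⟩ := p
    cases r' with
    | none =>
      obtain ⟨h1, h2, h3, _⟩ := h
      rw [h' i j h1 h2] at h3
      exact absurd h3 (by simp)
    | some p' =>
      obtain ⟨i', j'⟩ := p'
      obtain ⟨h1, h2, h3, h4⟩ := h
      obtain ⟨h1', h2', h3', h4'⟩ := h'
      have a1 := h4 i' j' h1' h2' h3'
      have a2 := h4' i j h1 h2 h3
      have : i = i' ∧ j = j' := by omega
      simp [this.1, this.2]

def pvCast (q : Nat × Nat) : Int × Int := ((q.1 : Int), (q.2 : Int))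

-- invariant of Source B's loop after the first t rows
def pvInv (l : List (List String)) (t : Nat)
    (st : PySem.Dict (String × String) (Int × List String × Option (PySem.Dict String Int)) × Option (Int × Int)) : Prop :=
  (∀ k : String × String,
      (st.1.get? k = none → pvFirstIdx (fun i => pvKey l i == k) t = none) ∧
      (∀ (m : Int) (fc : List String) (dOpt : Option (PySem.Dict String Int)),
        st.1.get? k = some (m, fc, dOpt) →
        (∃ nm, pvFirstIdx (fun i => pvKey l i == k) t = some nm ∧ m = (nm : Int) ∧
          pvBFld fc 2 = pvPatr l nm ∧
          (dOpt = none → ∀ i, i < t → (pvKey l i == k) = true → i = nm)) ∧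
        (∀ d, dOpt = some d → ∀ p : String,
          d.get? p = (pvFirstIdx (fun i => pvKey l i == k && pvPatr l i == p) t).map (fun n => (n : Int)))))
  ∧ st.2 = (pvBest l t).map pvCast

lemma pvCandS_eq_key (l : List (List String)) (s : Nat) :
    pvCandS l s = pvFirstIdx (fun i => (pvKey l i == pvKey l s) &&
      (pvPatr l i == pvPatr l s || (pvPatr l i == "" || pvPatr l s == ""))) s :=
  pvFirstIdx_congr fun i _ => pvMatch_eq l i s

lemma pvCand_eq (l : List (List String)) (s : Nat) (m : Int) (d : PySem.Dict String Int)
    (hm : ∃ nm, pvFirstIdx (fun i => pvKey l i == pvKey l s) s = some nm ∧ m = (nm : Int))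
    (hdp : ∀ p, d.get? p = (pvFirstIdx (fun i => pvKey l i == pvKey l s && pvPatr l i == p) s).map (fun n => (n : Int))) :
    pvCand d m (pvPatr l s) = (pvCandS l s).map (fun n => (n : Int)) := by
  rw [pvCandS_eq_key]
  by_cases hp : pvPatr l s = ""
  · obtain ⟨nm, hnm, hmv⟩ := hm
    rw [pvFirstIdx_congr (P := fun i => (pvKey l i == pvKey l s) &&
        (pvPatr l i == pvPatr l s || (pvPatr l i == "" || pvPatr l s == "")))
        (Q := fun i => pvKey l i == pvKey l s) (fun i _ => by
          rw [hp]; simp)]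
    rw [hnm]
    simp [pvCand, hp, hmv]
  · have hp' : (pvPatr l s == "") = false := beq_eq_false_iff_ne.mpr hp
    rw [pvFirstIdx_congr (Q := fun i => ((pvKey l i == pvKey l s) && (pvPatr l i == pvPatr l s)) ||
        ((pvKey l i == pvKey l s) && (pvPatr l i == ""))) (fun i _ => by
          rw [hp', Bool.or_false, Bool.and_or_distrib_left])]
    rw [pvFirstIdx_or]
    have h1 := hdp (pvPatr l s)
    have h2 := hdp ""
    simp only [pvCand, hp', Bool.false_eq_true, if_false]
    rw [h1, h2]
    cases hf2 : pvFirstIdx (fun i => pvKey l i == pvKey l s && pvPatr l i == "") s with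
    | none =>
      cases hf1 : pvFirstIdx (fun i => pvKey l i == pvKey l s && pvPatr l i == pvPatr l s) s <;>
        simp [pvOMin]
    | some n2 =>
      cases hf1 : pvFirstIdx (fun i => pvKey l i == pvKey l s && pvPatr l i == pvPatr l s) s with
      | none => simp [pvOMin]
      | some n1 =>
        simp only [pvOMin]
        by_cases hlt : n1 < n2
        · simp [hlt, Nat.min_eq_left (by omega : n1 ≤ n2)]
        · simp [hlt, Nat.min_eq_right (by omega : n2 ≤ n1)]

lemma pvBest_step (l : List (List String)) (s : Nat) :
    (match (pvCandS l s).map (fun n => (n : Int)) with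
      | none => (pvBest l s).map pvCast
      | some cv =>
          match (pvBest l s).map pvCast with
          | none => some (cv, (s : Int))
          | some b => if cv < b.1 then some (cv, (s : Int)) else some b) =
    (pvBest l (s + 1)).map pvCast := by
  show _ = (match pvCandS l s with
      | none => pvBest l s
      | some c =>
          match pvBest l s with
          | none => some (c, s)
          | some b => if c < b.1 then some (c, s) else some b).map pvCast
  cases hc : pvCandS l s with
  | none => simp
  | some cv =>
    cases hb : pvBest l s with
    | none => simp [pvCast]
    | some b =>
      obtain ⟨bi, bj⟩ := b
      by_cases hlt : cv < bi
      · simp [pvCast, hlt]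
      · simp [pvCast, hlt]

lemma pvStepInv {l : List (List String)} {s : Nat} {c : List String} {rest : List (List String)}
    {st : PySem.Dict (String × String) (Int × List String × Option (PySem.Dict String Int)) × Option (Int × Int)}
    (hd : l.drop s = c :: rest) (hinv : pvInv l s st) :
    pvInv l (s + 1) (pvStep st ((s : Int), c)) := by
  obtain ⟨groups, best⟩ := st
  obtain ⟨hG, hB⟩ := hinv
  have hB' : best = (pvBest l s).map pvCast := hB
  subst hB'
  have hcel : l[s]? = some c := by rw [← List.head?_drop, hd]; rfl
  have hfld : ∀ k : Nat, pvBFld c k = pvFld l s k := by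
    intro k
    simp [pvBFld, pvFld, hcel]
  have hkey : (pvBFld c 0, pvBFld c 1) = pvKey l s := by rw [hfld, hfld]; rfl
  have hpat : pvBFld c 2 = pvPatr l s := hfld 2
  have hcarry : ∀ (P : Nat → Bool), P s = false → pvFirstIdx P (s + 1) = pvFirstIdx P s := by
    intro P hP
    simp only [pvFirstIdx]
    cases hx : pvFirstIdx P s <;> simp [hP]
  have hkeep : ∀ (V : Int × List String × Option (PySem.Dict String Int)) (k : String × String),
      k ≠ pvKey l s →
      (((groups.insert (pvKey l s) V).get? k = none →
          pvFirstIdx (fun i => pvKey l i == k) (s + 1) = none) ∧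
       (∀ (m : Int) (fc : List String) (dOpt : Option (PySem.Dict String Int)),
         (groups.insert (pvKey l s) V).get? k = some (m, fc, dOpt) →
         (∃ nm, pvFirstIdx (fun i => pvKey l i == k) (s + 1) = some nm ∧ m = (nm : Int) ∧
           pvBFld fc 2 = pvPatr l nm ∧
           (dOpt = none → ∀ i, i < s + 1 → (pvKey l i == k) = true → i = nm)) ∧
         (∀ d, dOpt = some d → ∀ p : String,
           d.get? p = (pvFirstIdx (fun i => pvKey l i == k && pvPatr l i == p) (s + 1)).map (fun n => (n : Int))))) := by
    intro V k hk
    have hks : (pvKey l s == k) = false := beq_eq_false_iff_ne.mpr (fun h => hk h.symm)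
    rw [PySem.Dict.get?_insert_of_ne _ _ hk]
    refine ⟨fun h => by rw [hcarry _ (by simp [hks])]; exact (hG k).1 h, fun m fc dOpt h => ?_⟩
    obtain ⟨⟨nm, hnm, hmv, hfc2, hsingle⟩, hdopt⟩ := (hG k).2 m fc dOpt h
    refine ⟨⟨nm, by rw [hcarry _ (by simp [hks])]; exact hnm, hmv, hfc2, ?_⟩, ?_⟩
    · intro hno i hi hKi
      rcases Nat.lt_succ_iff_lt_or_eq.mp hi with h' | h'
      · exact hsingle hno i h' hKi
      · subst h'; rw [hks] at hKi; cases hKi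
    · intro d hdd p
      rw [hcarry _ (by simp [hks])]
      exact hdopt d hdd p
  cases hg : groups.get? (pvKey l s) with
  | none =>
    have hKnone := (hG (pvKey l s)).1 hg
    simp only [pvStep, hkey, hg]
    constructor
    · intro k
      by_cases hk : k = pvKey l s
      · subst hk
        simp only [PySem.Dict.get?_insert_self]
        refine ⟨(fun h => by simp at h), fun m fc dOpt h => ?_⟩
        simp only [Option.some.injEq, Prod.mk.injEq] at h
        obtain ⟨hm, hfc, hdo⟩ := h
        subst hm; subst hfc; subst hdo
        refine ⟨⟨s, ?_, rfl, hpat, ?_⟩, ?_⟩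
        · simp only [pvFirstIdx]
          rw [hKnone]
          simp
        · intro _ i hi hKi
          rcases Nat.lt_succ_iff_lt_or_eq.mp hi with h' | h'
          · rw [pvFirstIdx_none.mp hKnone i h'] at hKi; cases hKi
          · exact h'
        · intro d hdd; cases hdd
      · exact hkeep _ k hk
    · have hcs : pvCandS l s = none := by
        unfold pvCandS
        rw [pvFirstIdx_none]
        intro i hi
        rw [pvMatch_eq]
        simp [pvFirstIdx_none.mp hKnone i hi]
      show (pvBest l s).map pvCast = (pvBest l (s + 1)).map pvCast
      simp only [pvBest]
      rw [hcs]
  | some g0 =>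
    obtain ⟨m, fc, dOpt⟩ := g0
    obtain ⟨⟨nm, hnm, hmv, hfc2, hsingle⟩, hdopt⟩ := (hG (pvKey l s)).2 m fc dOpt hg
    obtain ⟨hnmlt, hKnm, hKmin⟩ := pvFirstIdx_some hnm
    have main : ∀ (dEff : PySem.Dict String Int),
        (∀ p, dEff.get? p = (pvFirstIdx (fun i => pvKey l i == pvKey l s && pvPatr l i == p) s).map (fun n => (n : Int))) →
        pvInv l (s + 1)
          (groups.insert (pvKey l s)
             (m, fc, some (if (dEff.get? (pvPatr l s)).isSome then dEff else dEff.insert (pvPatr l s) (s : Int))),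
           match pvCand dEff m (pvPatr l s) with
           | none => (pvBest l s).map pvCast
           | some cv =>
               match (pvBest l s).map pvCast with
               | none => some (cv, (s : Int))
               | some b => if cv < b.1 then some (cv, (s : Int)) else some b) := by
      intro dEff hdp
      constructor
      · intro k
        by_cases hk : k = pvKey l s
        · subst hk
          simp only [PySem.Dict.get?_insert_self]
          refine ⟨(fun h => by simp at h), fun m' fc' dOpt' h => ?_⟩
          simp only [Option.some.injEq, Prod.mk.injEq] at h
          obtain ⟨hm', hfc', hdo'⟩ := h
          subst hm'; subst hfc'; subst hdo'
          refine ⟨⟨nm, by simp only [pvFirstIdx]; rw [hnm], hmv, hfc2, (fun hno => by cases hno)⟩, ?_⟩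
          intro d'' hdd p
          have hdd2 : (if (dEff.get? (pvPatr l s)).isSome then dEff else dEff.insert (pvPatr l s) (s : Int)) = d'' :=
            Option.some.inj hdd
          subst hdd2
          by_cases hpp : p = pvPatr l s
          · subst hpp
            by_cases hsome : (dEff.get? (pvPatr l s)).isSome
            · rw [if_pos hsome]
              rw [hdp (pvPatr l s)]
              cases hf : pvFirstIdx (fun i => pvKey l i == pvKey l s && pvPatr l i == pvPatr l s) s with
              | none => rw [hdp (pvPatr l s), hf] at hsome; simp at hsome
              | some n =>
                simp only [pvFirstIdx]
                rw [hf]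
            · rw [if_neg hsome]
              have hnone : pvFirstIdx (fun i => pvKey l i == pvKey l s && pvPatr l i == pvPatr l s) s = none := by
                cases hf : pvFirstIdx (fun i => pvKey l i == pvKey l s && pvPatr l i == pvPatr l s) s with
                | none => rfl
                | some n => rw [hdp (pvPatr l s), hf] at hsome; simp at hsome
              rw [PySem.Dict.get?_insert_self]
              simp only [pvFirstIdx]
              rw [hnone]
              simp
          · have hne : (pvPatr l s == p) = false := beq_eq_false_iff_ne.mpr (fun h => hpp h.symm)
            have hds : dEff.get? p = ((if (dEff.get? (pvPatr l s)).isSome then dEff else dEff.insert (pvPatr l s) (s : Int))).get? p := by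
              by_cases hsome : (dEff.get? (pvPatr l s)).isSome
              · rw [if_pos hsome]
              · rw [if_neg hsome, PySem.Dict.get?_insert_of_ne _ _ (fun h => hpp h)]
            rw [← hds, hdp p, hcarry _ (by simp [hne])]
        · exact hkeep _ k hk
      · simp only []
        rw [pvCand_eq l s m dEff ⟨nm, hnm, hmv⟩ hdp]
        exact pvBest_step l s
    cases dOpt with
    | some d =>
      simp only [pvStep, hkey, hpat, hg]
      exact main d (hdopt d rfl)
    | none =>
      simp only [pvStep, hkey, hpat, hg]
      refine main ((PySem.Dict.empty).insert (pvBFld fc 2) m) ?_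
      intro p
      rw [hfc2, hmv]
      by_cases hpq : p = pvPatr l nm
      · rw [hpq, PySem.Dict.get?_insert_self]
        rw [pvFirstIdx_eq_some hnmlt (by simp [hKnm]) (fun i' hi' => by simp [hKmin i' hi'])]
        simp
      · rw [PySem.Dict.get?_insert_of_ne _ _ hpq, PySem.Dict.get?_empty]
        have hnone : pvFirstIdx (fun i => pvKey l i == pvKey l s && pvPatr l i == p) s = none := by
          rw [pvFirstIdx_none]
          intro i hi
          by_cases hKi : (pvKey l i == pvKey l s) = true
          · have hieq := hsingle rfl i hi hKi
            subst hieq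
            have : (pvPatr l i == p) = false := beq_eq_false_iff_ne.mpr (fun h => hpq h.symm)
            simp [this]
          · have : (pvKey l i == pvKey l s) = false := by simpa using hKi
            simp [this]
        rw [hnone]
        rfl

lemma pvFoldInv (l : List (List String)) : ∀ (rest : List (List String)) (s : Nat)
    (st : PySem.Dict (String × String) (Int × List String × Option (PySem.Dict String Int)) × Option (Int × Int)),
    l.drop s = rest → pvInv l s st →
    pvInv l (s + rest.length) ((PySem.List.enumerate rest (s : Int)).foldl pvStep st) := by
  intro rest
  induction rest with
  | nil =>
    intro s st _ hinv
    simpa [PySem.List.enumerate_nil] using hinv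
  | cons c rest ih =>
    intro s st hd hinv
    rw [PySem.List.enumerate_cons]
    simp only [List.foldl_cons]
    have hd' : l.drop (s + 1) = rest := by
      have h2 : l.drop (s + 1) = (l.drop s).drop 1 := by rw [List.drop_drop]
      rw [h2, hd]; rfl
    have hst := pvStepInv hd hinv
    have hcast : ((s : Int) + 1) = (((s + 1 : Nat)) : Int) := by push_cast; ring
    rw [hcast]
    have hlen : s + (c :: rest).length = (s + 1) + rest.length := by simp [List.length_cons]; omega
    rw [hlen]
    exact ih (s + 1) _ hd' hst

lemma pvMain (l : List (List String)) : find_duples l = find_duples_alt l := by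
  have hBlex := pvBest_lex l l.length
  have heq : pvOuter l (List.range (l.length - 1)) = pvBest l l.length := by
    rw [List.range_eq_range']
    exact pvLex_unique (pvAok_lex (pvOuter_ok l (l.length - 1) 0 (by omega))) hBlex
  have hinv0 : pvInv l 0 (PySem.Dict.empty, none) := by
    refine ⟨fun k => ⟨fun _ => rfl, fun m fc dOpt h => ?_⟩, rfl⟩
    rw [PySem.Dict.get?_empty] at h
    cases h
  have hfold := pvFoldInv l l 0 (PySem.Dict.empty, none) (by simp) hinv0
  have hsnd : ((PySem.List.enumerate l 0).foldl pvStep (PySem.Dict.empty, none)).2 =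
      (pvBest l l.length).map pvCast := by
    have := hfold.2
    simpa using this
  unfold find_duples find_duples_alt
  rw [hsnd, heq]
  cases pvBest l l.length with
  | none => simp
  | some p =>
    obtain ⟨i, j⟩ := p
    simp [pvCast]

-- ===== VERDICT (by name: the statement is the Claim_ definition above) =====
theorem find_duples_spec : Claim_equal_find_duples := by
  intro smart_contacts_list _ _
  unfold Spec_find_duples
  exact pvMain smart_contacts_list
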